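-- pv_equiv track=rewrite | github.com/Masaneh567/Golomb_Rulers | Golomb_sparse_rulers.py | ismyrulergolomb
-- ===== SOURCE A (Python) =====
-- def ismyrulergolomb(myruler):
--     hitcount = 0
--     listofdifferences = []
--     for i in range(len(myruler)):
--         for j in range(i+1,len(myruler)):
--             listofdifferences.append(myruler[j]-myruler[i])
--
--     for k in listofdifferences :
--
--
--         if listofdifferences.count(k) == 1 :
--             hitcount = hitcount +1
--
--     if hitcount == len(listofdifferences):
--         return True
--     else:
--         return False
-- ===== SOURCE B (Python) =====
-- def ismyrulergolomb(myruler):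
--     n = len(myruler)
--     diffs = sorted(myruler[j] - myruler[i]
--                    for i in range(n) for j in range(i + 1, n))
--     for prev, cur in zip(diffs, diffs[1:]):
--         if prev == cur:
--             return False
--     return True
-- ===== Notes on version B (the rewrite author's own statement) =====
-- stated objective: faster
-- what changed: Replaces A's quadratic check (list.count of every difference against the whole list) by sorting the differences once and scanning adjacent pairs for an equal neighbour.
import Mathlib
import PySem

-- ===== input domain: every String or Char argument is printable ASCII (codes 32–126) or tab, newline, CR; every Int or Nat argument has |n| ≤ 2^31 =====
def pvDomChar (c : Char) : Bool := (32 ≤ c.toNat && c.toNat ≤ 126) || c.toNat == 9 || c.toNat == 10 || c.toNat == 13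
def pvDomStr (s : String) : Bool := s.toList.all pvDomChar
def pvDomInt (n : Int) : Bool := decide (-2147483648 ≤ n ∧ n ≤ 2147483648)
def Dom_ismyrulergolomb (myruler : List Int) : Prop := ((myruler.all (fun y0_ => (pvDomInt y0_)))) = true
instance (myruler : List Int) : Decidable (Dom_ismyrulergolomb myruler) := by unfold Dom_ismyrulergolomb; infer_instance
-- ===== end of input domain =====

-- B replaces A's quadratic count-every-difference check by sorting the differences once and
-- scanning adjacent pairs (objective: faster, O(d log d) vs O(d^2) over d = n(n-1)/2 differences).

-- ===== PORT A =====
def ismyrulergolomb (myruler : List Int) : Bool :=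
  let listofdifferences :=
    (PySem.List.pyRange 0 (myruler.length : Int) 1).foldl (fun acc i =>
      (PySem.List.pyRange (i + 1) (myruler.length : Int) 1).foldl (fun acc2 j =>
        acc2 ++ [PySem.List.pyGetD myruler j 0 - PySem.List.pyGetD myruler i 0]) acc) []
  let hitcount : Int :=
    listofdifferences.foldl (fun acc k =>
      if PySem.List.count listofdifferences k == 1 then acc + 1 else acc) 0
  if hitcount == (listofdifferences.length : Int) then true else false

-- ===== PORT B =====
-- the 'for prev, cur in zip(diffs, diffs[1:])' adjacent scan of Source B
def pvAdjScan : List Int → Bool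
  | a :: b :: t => if a == b then false else pvAdjScan (b :: t)
  | _ => true

def ismyrulergolomb_alt (myruler : List Int) : Bool :=
  let n : Int := (myruler.length : Int)
  let diffs := PySem.List.sorted
    ((PySem.List.pyRange 0 n 1).flatMap (fun i =>
      (PySem.List.pyRange (i + 1) n 1).map (fun j =>
        PySem.List.pyGetD myruler j 0 - PySem.List.pyGetD myruler i 0)))
    (fun x => x) false
  pvAdjScan diffs

-- ===== PRECONDITION & SPEC =====
def Spec_ismyrulergolomb (myruler : List Int) (out : Bool) : Prop := out = ismyrulergolomb_alt myruler
instance (myruler : List Int) (out : Bool) : Decidable (Spec_ismyrulergolomb myruler out) := by unfold Spec_ismyrulergolomb; infer_instance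

-- ===== CLAIM (what is proved, stated in full; the proofs are below) =====
def Claim_equal_ismyrulergolomb : Prop := ∀ (myruler : List Int), Dom_ismyrulergolomb myruler → Spec_ismyrulergolomb myruler (ismyrulergolomb myruler)

-- ===== LEMMAS AND PROOFS =====

-- A's nested append loops build exactly the flatMap/map comprehension B starts from
lemma pv_flat (h : Int → List Int) :
    ∀ (l : List Int) (a : List Int),
      l.foldl (fun acc i => acc ++ h i) a = a ++ l.flatMap h := by
  intro l
  induction l with
  | nil => simp
  | cons x t ih =>
      intro a
      rw [List.foldl_cons, List.flatMap_cons, ih, List.append_assoc]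

lemma pv_diffs_eq (g : Int → List Int) (f : Int → Int → Int) (l : List Int) (a : List Int) :
      l.foldl (fun acc i => (g i).foldl (fun acc2 j => acc2 ++ [f i j]) acc) a
        = a ++ l.flatMap (fun i => (g i).map (f i)) := by
  simp only [PySem.List.foldl_append_singleton_eq_map]
  exact pv_flat _ l a

-- A's hit-counting loop counts the elements whose multiplicity is 1
lemma pv_hit_eq (d : List Int) : ∀ (l : List Int) (a : Int),
    l.foldl (fun acc k => if PySem.List.count d k == 1 then acc + 1 else acc) a
      = a + (l.countP (fun k => PySem.List.count d k == 1) : Int) := by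
  intro l
  induction l with
  | nil => simp
  | cons x t ih =>
      intro a
      rw [List.foldl_cons, ih, List.countP_cons]
      by_cases h : (PySem.List.count d x == 1) = true <;> simp [h] <;> omega

-- on a ≤-sorted list the adjacent scan decides Nodup
lemma pv_scan_nodup : ∀ (l : List Int), l.Pairwise (· ≤ ·) →
    (pvAdjScan l = true ↔ l.Nodup) := by
  intro l
  induction l with
  | nil => simp [pvAdjScan]
  | cons a t ih =>
      intro hp
      cases t with
      | nil => simp [pvAdjScan]
      | cons b u =>
          have hp' := hp.tail
          by_cases hab : a = b
          · subst hab
            simp [pvAdjScan]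
          · have hrest := ih hp'
            constructor
            · intro h
              have h' : pvAdjScan (b :: u) = true := by
                simpa [pvAdjScan, hab] using h
              have hnd := hrest.mp h'
              refine List.Nodup.cons ?_ hnd
              intro hmem
              rcases List.mem_cons.mp hmem with h1 | h2
              · exact hab h1
              · have hab' : a ≤ b := (List.pairwise_cons.mp hp).1 b (by simp)
                have hbx : b ≤ a := (List.pairwise_cons.mp hp').1 a h2
                exact hab (le_antisymm hab' hbx)
            · intro hnd
              have : pvAdjScan (b :: u) = true := hrest.mpr hnd.tail
              simpa [pvAdjScan, hab] using this

lemma pv_count_iff (d : List Int) :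
    (d.countP (fun k => PySem.List.count d k == 1) = d.length) ↔ d.Nodup := by
  rw [List.countP_eq_length]
  constructor
  · intro h
    rw [List.nodup_iff_count_le_one]
    intro a
    by_cases ha : a ∈ d
    · have := h a ha
      simp [PySem.List.count] at this
      omega
    · simp [List.count_eq_zero_of_not_mem ha]
  · intro hnd a ha
    simp [PySem.List.count]
    exact List.count_eq_one_of_mem hnd ha

-- ===== VERDICT (by name: the statement is the Claim_ definition above) =====
theorem ismyrulergolomb_spec : Claim_equal_ismyrulergolomb := by
  intro myruler _
  unfold Spec_ismyrulergolomb ismyrulergolomb ismyrulergolomb_alt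
  simp only [pv_diffs_eq, List.nil_append, pv_hit_eq, Int.zero_add]
  set d := (PySem.List.pyRange 0 (myruler.length : Int) 1).flatMap (fun i =>
      (PySem.List.pyRange (i + 1) (myruler.length : Int) 1).map (fun j =>
        PySem.List.pyGetD myruler j 0 - PySem.List.pyGetD myruler i 0)) with hd
  have hperm : (PySem.List.sorted d (fun x => x) false).Perm d := PySem.List.sorted_perm d (fun x => x) false
  have hsorted : (PySem.List.sorted d (fun x => x) false).Pairwise (· ≤ ·) :=
    PySem.List.sorted_pairwise d (fun x => x)
  have hscan := pv_scan_nodup _ hsorted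
  have hcnt := pv_count_iff d
  have hA : (if ((d.countP (fun k => PySem.List.count d k == 1) : Int) == (d.length : Int))
      then true else false) = true ↔ d.Nodup := by
    rw [← hcnt]
    constructor
    · intro h
      split_ifs at h with h'
      · have h'' : ((d.countP (fun k => PySem.List.count d k == 1) : Int)) = (d.length : Int) := by
          simpa using h'
        exact_mod_cast h''
    · intro h
      have h' : ((d.countP (fun k => PySem.List.count d k == 1) : Int)) = (d.length : Int) := by
        exact_mod_cast h
      rw [h']
      simp
  rw [Bool.eq_iff_iff, hA, hscan, hperm.nodup_iff]
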